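-- pv_equiv track=rewrite | github.com/liuyixin-louis/ExamTimetabling_Problem-using-mode-d-Algorithm | debug/delte_old_course_in_better_pi.py | delte_old_course_in_better_pi
-- ===== SOURCE A (Python) =====
-- def delte_old_course_in_better_pi(tb,better_pi):
--     """
--
--     """
--     bp = better_pi.copy()
--     # 遍历better_pi中的课程
--     for pi in bp.values():
--         for ci in pi:
--             for pj in tb:
--                 # 遍历tb的课程
--                 if ci in pj:
--                     # 删除他
--                     pj.remove(ci)
--                     break
--     delte_list = []
--     for j in range(len(tb)):
--         if len(tb[j])==0:
--             delte_list.append(j)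
--
--     for i in sorted(delte_list,reverse=1):
--         tb.pop(i)
--
--     return tb
-- ===== SOURCE B (Python) =====
-- # Single-pass rewrite: count removal budget per course once, then filter each group
-- # in one pass. Equivalent on the RETURN value only: A mutates tb in place, B does not.
-- def delte_old_course_in_better_pi(tb, better_pi):
--     remaining = {}
--     for pi in better_pi.values():
--         for c in pi:
--             remaining[c] = remaining.get(c, 0) + 1
--     out = []
--     for group in tb:
--         kept = []
--         for c in group:
--             if remaining.get(c, 0) > 0:
--                 remaining[c] = remaining[c] - 1
--             else:
--                 kept.append(c)
--         if kept:
--             out.append(kept)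
--     return out
-- ===== Notes on version B (the rewrite author's own statement) =====
-- stated objective: faster
-- what changed: Instead of rescanning all of tb for every course in better_pi and popping empty groups by index afterwards, B counts each course's removal budget in one dict pass and then filters every group in a single left-to-right pass, dropping groups that become empty as it goes.
import Mathlib
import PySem

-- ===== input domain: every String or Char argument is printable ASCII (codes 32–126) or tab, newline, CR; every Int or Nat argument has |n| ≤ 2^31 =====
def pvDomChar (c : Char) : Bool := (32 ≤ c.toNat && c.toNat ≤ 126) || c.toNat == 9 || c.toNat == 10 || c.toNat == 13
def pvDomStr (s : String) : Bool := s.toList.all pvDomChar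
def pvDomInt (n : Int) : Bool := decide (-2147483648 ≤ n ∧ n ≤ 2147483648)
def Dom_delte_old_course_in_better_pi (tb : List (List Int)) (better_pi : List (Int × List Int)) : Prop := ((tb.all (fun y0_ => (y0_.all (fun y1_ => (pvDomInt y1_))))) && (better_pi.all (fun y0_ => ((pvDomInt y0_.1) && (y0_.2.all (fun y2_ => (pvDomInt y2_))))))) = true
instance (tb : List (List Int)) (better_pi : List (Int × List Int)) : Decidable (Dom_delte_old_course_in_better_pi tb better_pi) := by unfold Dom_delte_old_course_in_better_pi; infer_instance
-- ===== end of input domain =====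

-- B removes each better_pi course once via a precomputed budget counter in one pass over tb
-- (asymptotically faster than A's rescan of tb per course); equivalence is about the RETURN
-- value only: Python A mutates tb in place, Python B does not.

-- ===== PORT A =====
-- inner 'for pj in tb: if ci in pj: pj.remove(ci); break' — one scan of the groups,
-- removing the first occurrence of ci from the first group containing it
def pvRemoveOnce (t : List (List Int)) (ci : Int) : List (List Int) :=
  match t with
  | [] => []
  | pj :: rest =>
    if pj.contains ci then ((PySem.List.remove? pj ci).getD pj) :: rest
    else pj :: pvRemoveOnce rest ci

-- tb.pop(i); in A the popped indices are always in range, so the 'getD t' default is dead code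
def pvPopStep (t : List (List Int)) (i : Int) : List (List Int) :=
  ((PySem.List.pop? t i).map (·.2)).getD t

def delte_old_course_in_better_pi (tb : List (List Int)) (better_pi : List (Int × List Int)) : List (List Int) :=
  let bp := PySem.Dict.ofList better_pi
  let tb1 := bp.values.foldl (fun t pi => pi.foldl pvRemoveOnce t) tb
  let delte_list := (PySem.List.pyRange 0 (PySem.List.len tb1) 1).foldl
      (fun acc j => if PySem.List.len (PySem.List.pyGetD tb1 j []) = 0 then acc ++ [j] else acc)
      ([] : List Int)
  (PySem.List.sorted delte_list (fun x => x) true).foldl pvPopStep tb1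

-- ===== PORT B =====
def delte_old_course_in_better_pi_alt (tb : List (List Int)) (better_pi : List (Int × List Int)) : List (List Int) :=
  let remaining := (PySem.Dict.ofList better_pi).values.foldl
      (fun d pi => pi.foldl (fun (d : PySem.Dict Int Int) c => d.modify c 0 (· + 1)) d)
      PySem.Dict.empty
  let r := tb.foldl
      (fun (acc : List (List Int) × PySem.Dict Int Int) group =>
        let p := group.foldl
          (fun (p : List Int × PySem.Dict Int Int) c =>
            if p.2.getD c 0 > 0 then (p.1, p.2.modify c 0 (· - 1)) else (p.1 ++ [c], p.2))
          (([] : List Int), acc.2)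
        (if p.1.isEmpty then acc.1 else acc.1 ++ [p.1], p.2))
      (([] : List (List Int)), remaining)
  r.1

-- ===== PRECONDITION & SPEC =====
def Spec_delte_old_course_in_better_pi (tb : List (List Int)) (better_pi : List (Int × List Int)) (out : List (List Int)) : Prop := out = delte_old_course_in_better_pi_alt tb better_pi
instance (tb : List (List Int)) (better_pi : List (Int × List Int)) (out : List (List Int)) : Decidable (Spec_delte_old_course_in_better_pi tb better_pi out) := by unfold Spec_delte_old_course_in_better_pi; infer_instance

-- ===== CLAIM (what is proved, stated in full; the proofs are below) =====
def Claim_equal_delte_old_course_in_better_pi : Prop := ∀ (tb : List (List Int)) (better_pi : List (Int × List Int)), Dom_delte_old_course_in_better_pi tb better_pi → Spec_delte_old_course_in_better_pi tb better_pi (delte_old_course_in_better_pi tb better_pi)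

-- ===== LEMMAS AND PROOFS =====

-- abstract counter model: a budget function Int → Int threaded through the groups
def pvFilt : (Int → Int) → List Int → List Int × (Int → Int)
  | cnt, [] => ([], cnt)
  | cnt, c :: g =>
    if cnt c > 0 then pvFilt (fun x => if x = c then cnt x - 1 else cnt x) g
    else
      let r := pvFilt cnt g
      (c :: r.1, r.2)

def pvProc : (Int → Int) → List (List Int) → List (List Int)
  | _, [] => []
  | cnt, g :: rest => (pvFilt cnt g).1 :: pvProc (pvFilt cnt g).2 rest

theorem pvFilt_congr (g : List Int) (c1 c2 : Int → Int) (h : ∀ x, c1 x = c2 x) :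
    (pvFilt c1 g).1 = (pvFilt c2 g).1 ∧ ∀ x, (pvFilt c1 g).2 x = (pvFilt c2 g).2 x := by
  induction g generalizing c1 c2 with
  | nil => exact ⟨rfl, h⟩
  | cons c g ih =>
    simp only [pvFilt]
    rw [h c]
    by_cases hc : c2 c > 0
    · simp only [if_pos hc]
      exact ih _ _ (fun x => by by_cases hx : x = c <;> simp [hx, h x, h c])
    · simp only [if_neg hc]
      obtain ⟨h1, h2⟩ := ih c1 c2 h
      exact ⟨by simp [h1], h2⟩

theorem pvProc_congr (t : List (List Int)) (c1 c2 : Int → Int) (h : ∀ x, c1 x = c2 x) :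
    pvProc c1 t = pvProc c2 t := by
  induction t generalizing c1 c2 with
  | nil => rfl
  | cons g rest ih =>
    obtain ⟨h1, h2⟩ := pvFilt_congr g c1 c2 h
    simp only [pvProc, h1, ih _ _ h2]

theorem pvFilt_nonneg (g : List Int) (cnt : Int → Int) (a : Int) (h : 0 ≤ cnt a) :
    0 ≤ (pvFilt cnt g).2 a := by
  induction g generalizing cnt with
  | nil => exact h
  | cons c g ih =>
    simp only [pvFilt]
    by_cases hc : cnt c > 0
    · simp only [if_pos hc]
      exact ih _ (by by_cases hx : a = c <;> simp [hx] <;> omega)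
    · simp only [if_neg hc]
      exact ih _ h

theorem pvFilt_cons_pos (cnt : Int → Int) (c : Int) (g : List Int) (hc : cnt c > 0) :
    pvFilt cnt (c :: g) = pvFilt (fun x => if x = c then cnt x - 1 else cnt x) g := by
  simp [pvFilt, hc]

theorem pvFilt_cons_neg (cnt : Int → Int) (c : Int) (g : List Int) (hc : ¬ cnt c > 0) :
    pvFilt cnt (c :: g) = (c :: (pvFilt cnt g).1, (pvFilt cnt g).2) := by
  simp [pvFilt, hc]

theorem pvFilt_inc (g : List Int) (a : Int) (cnt : Int → Int) (h : 0 ≤ cnt a) :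
    (a ∈ (pvFilt cnt g).1 →
      (pvFilt (fun x => if x = a then cnt x + 1 else cnt x) g).1 = (pvFilt cnt g).1.erase a ∧
      ∀ x, (pvFilt (fun x => if x = a then cnt x + 1 else cnt x) g).2 x = (pvFilt cnt g).2 x) ∧
    (a ∉ (pvFilt cnt g).1 →
      (pvFilt (fun x => if x = a then cnt x + 1 else cnt x) g).1 = (pvFilt cnt g).1 ∧
      ∀ x, (pvFilt (fun x => if x = a then cnt x + 1 else cnt x) g).2 x =
        (if x = a then (pvFilt cnt g).2 x + 1 else (pvFilt cnt g).2 x)) := by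
  induction g generalizing cnt with
  | nil =>
    refine ⟨fun hmem => absurd hmem (List.not_mem_nil), fun _ => ⟨rfl, fun x => rfl⟩⟩
  | cons c g ih =>
    by_cases hca : c = a
    · subst hca
      by_cases hpos : cnt c > 0
      · have hpos' : (fun x => if x = c then cnt x + 1 else cnt x) c > 0 := by simp; omega
        rw [pvFilt_cons_pos cnt c g hpos, pvFilt_cons_pos _ c g hpos']
        have hpt : ∀ x, (fun x => if x = c then (fun y => if y = c then cnt y + 1 else cnt y) x - 1
            else (fun y => if y = c then cnt y + 1 else cnt y) x) x
            = (fun x => if x = c then (fun y => if y = c then cnt y - 1 else cnt y) x + 1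
            else (fun y => if y = c then cnt y - 1 else cnt y) x) x := by
          intro x; by_cases hx : x = c <;> simp [hx]
        obtain ⟨e1, e2⟩ := pvFilt_congr g _ _ hpt
        obtain ⟨ha1, ha2⟩ := ih (fun y => if y = c then cnt y - 1 else cnt y) (by simp; omega)
        constructor
        · intro hmem
          obtain ⟨b1, b2⟩ := ha1 hmem
          exact ⟨e1.trans b1, fun x => (e2 x).trans (b2 x)⟩
        · intro hmem
          obtain ⟨b1, b2⟩ := ha2 hmem
          exact ⟨e1.trans b1, fun x => (e2 x).trans (b2 x)⟩
      · have hz : cnt c = 0 := le_antisymm (by omega) h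
        have hpos' : (fun x => if x = c then cnt x + 1 else cnt x) c > 0 := by simp; omega
        rw [pvFilt_cons_neg cnt c g hpos, pvFilt_cons_pos _ c g hpos']
        have hpt : ∀ x, (fun x => if x = c then (fun y => if y = c then cnt y + 1 else cnt y) x - 1
            else (fun y => if y = c then cnt y + 1 else cnt y) x) x = cnt x := by
          intro x; by_cases hx : x = c <;> simp [hx]
        obtain ⟨e1, e2⟩ := pvFilt_congr g _ cnt hpt
        constructor
        · intro _
          exact ⟨by simp [e1], e2⟩
        · intro hmem
          exact absurd (List.mem_cons_self) hmem
    · have hicc : (fun x => if x = a then cnt x + 1 else cnt x) c = cnt c := by simp [hca]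
      by_cases hpos : cnt c > 0
      · have hpos' : (fun x => if x = a then cnt x + 1 else cnt x) c > 0 := by rw [hicc]; exact hpos
        rw [pvFilt_cons_pos cnt c g hpos, pvFilt_cons_pos _ c g hpos']
        have hpt : ∀ x, (fun x => if x = c then (fun y => if y = a then cnt y + 1 else cnt y) x - 1
            else (fun y => if y = a then cnt y + 1 else cnt y) x) x
            = (fun x => if x = a then (fun y => if y = c then cnt y - 1 else cnt y) x + 1
            else (fun y => if y = c then cnt y - 1 else cnt y) x) x := by
          intro x
          by_cases hx : x = c
          · subst hx; simp [hca]
          · have hac : ¬ a = c := fun h' => hca h'.symm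
            by_cases hy : x = a <;> simp [hx, hy, hac]
        obtain ⟨e1, e2⟩ := pvFilt_congr g _ _ hpt
        have hna : 0 ≤ (fun y => if y = c then cnt y - 1 else cnt y) a := by
          show 0 ≤ if a = c then cnt a - 1 else cnt a
          rw [if_neg (fun h' => hca h'.symm)]; exact h
        obtain ⟨ha1, ha2⟩ := ih (fun y => if y = c then cnt y - 1 else cnt y) hna
        constructor
        · intro hmem
          obtain ⟨b1, b2⟩ := ha1 hmem
          exact ⟨e1.trans b1, fun x => (e2 x).trans (b2 x)⟩
        · intro hmem
          obtain ⟨b1, b2⟩ := ha2 hmem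
          exact ⟨e1.trans b1, fun x => (e2 x).trans (b2 x)⟩
      · have hpos' : ¬ ((fun x => if x = a then cnt x + 1 else cnt x) c > 0) := by
          rw [hicc]; exact hpos
        rw [pvFilt_cons_neg cnt c g hpos, pvFilt_cons_neg _ c g hpos']
        obtain ⟨ha1, ha2⟩ := ih cnt h
        constructor
        · intro hmem
          have hmem' : a ∈ (pvFilt cnt g).1 := by
            rcases List.mem_cons.mp hmem with h' | h'
            · exact absurd h'.symm hca
            · exact h'
          obtain ⟨b1, b2⟩ := ha1 hmem'
          refine ⟨?_, b2⟩
          have he : (c :: (pvFilt cnt g).1).erase a = c :: (pvFilt cnt g).1.erase a :=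
            List.erase_cons_tail (by simp [hca])
          simp only []
          rw [he, ha1 hmem' |>.1]
        · intro hmem
          have hmem' : a ∉ (pvFilt cnt g).1 := fun h' => hmem (List.mem_cons_of_mem _ h')
          obtain ⟨b1, b2⟩ := ha2 hmem'
          exact ⟨by simp [b1], b2⟩

theorem pvRemoveOnce_proc (t : List (List Int)) (a : Int) (cnt : Int → Int) (h : 0 ≤ cnt a) :
    pvRemoveOnce (pvProc cnt t) a = pvProc (fun x => if x = a then cnt x + 1 else cnt x) t := by
  induction t generalizing cnt with
  | nil => rfl
  | cons g rest ih =>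
    simp only [pvProc, pvRemoveOnce]
    by_cases hmem : a ∈ (pvFilt cnt g).1
    · rw [if_pos (by simpa using hmem)]
      obtain ⟨b1, b2⟩ := (pvFilt_inc g a cnt h).1 hmem
      rw [PySem.List.remove?_eq_some_erase _ a hmem]
      simp only [Option.getD_some]
      rw [b1.symm, pvProc_congr rest _ _ b2]
    · rw [if_neg (by simpa using hmem)]
      obtain ⟨b1, b2⟩ := (pvFilt_inc g a cnt h).2 hmem
      rw [ih _ (pvFilt_nonneg g cnt a h), b1.symm, pvProc_congr rest _ _ (fun x => (b2 x).symm)]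

theorem pvFilt_zero (g : List Int) : (pvFilt (fun _ => 0) g).1 = g ∧ ∀ x, (pvFilt (fun _ => 0) g).2 x = 0 := by
  induction g with
  | nil => exact ⟨rfl, fun _ => rfl⟩
  | cons c g ih =>
    rw [pvFilt_cons_neg _ c g (by omega)]
    exact ⟨by simp [ih.1], ih.2⟩

theorem pvProc_zero (t : List (List Int)) : pvProc (fun _ => 0) t = t := by
  induction t with
  | nil => rfl
  | cons g rest ih =>
    simp only [pvProc, (pvFilt_zero g).1]
    rw [pvProc_congr rest _ _ (pvFilt_zero g).2, ih]

theorem pvFoldlRemove (cs : List Int) (t : List (List Int)) :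
    cs.foldl pvRemoveOnce t = pvProc (fun c => (cs.count c : Int)) t := by
  induction cs using List.reverseRecOn with
  | nil => simp [pvProc_zero]
  | append_singleton cs a ih =>
    rw [List.foldl_append, List.foldl_cons, List.foldl_nil, ih,
      pvRemoveOnce_proc t a _ (by positivity)]
    refine pvProc_congr t _ _ (fun x => ?_)
    simp only [List.count_append, List.count_cons, List.count_nil]
    by_cases hx : x = a
    · simp [hx]
    · simp [hx]
      exact fun h' : a = x => hx h'.symm

theorem pvFoldlNested (vs : List (List Int)) (init : List (List Int)) :
    vs.foldl (fun t pi => pi.foldl pvRemoveOnce t) init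
      = (vs.flatMap id).foldl pvRemoveOnce init := by
  induction vs generalizing init with
  | nil => rfl
  | cons pi vs ih => simp [List.foldl_append, ih]

theorem pvCntBuild (vs : List (List Int)) (d : PySem.Dict Int Int) (x : Int) :
    ((vs.foldl (fun d pi => pi.foldl (fun (d : PySem.Dict Int Int) c => d.modify c 0 (· + 1)) d) d).getD x 0)
      = d.getD x 0 + ((vs.flatMap id).count x : Int) := by
  induction vs generalizing d with
  | nil => simp
  | cons pi vs ih =>
    simp only [List.foldl_cons, List.flatMap_cons, id, List.count_append]
    rw [ih, PySem.Dict.getD_foldl_modify_add_one]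
    push_cast
    ring

theorem pvBgroup (g : List Int) (acc : List Int) (d : PySem.Dict Int Int) (cnt : Int → Int)
    (hd : ∀ x, d.getD x 0 = cnt x) :
    (g.foldl (fun (p : List Int × PySem.Dict Int Int) c =>
        if p.2.getD c 0 > 0 then (p.1, p.2.modify c 0 (· - 1)) else (p.1 ++ [c], p.2)) (acc, d)).1
      = acc ++ (pvFilt cnt g).1 ∧
    ∀ x, (g.foldl (fun (p : List Int × PySem.Dict Int Int) c =>
        if p.2.getD c 0 > 0 then (p.1, p.2.modify c 0 (· - 1)) else (p.1 ++ [c], p.2)) (acc, d)).2.getD x 0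
      = (pvFilt cnt g).2 x := by
  induction g generalizing acc d cnt with
  | nil => exact ⟨by simp [pvFilt], fun x => hd x⟩
  | cons c g ih =>
    simp only [List.foldl_cons]
    by_cases hc : cnt c > 0
    · rw [if_pos (by rw [hd c]; exact hc), pvFilt_cons_pos cnt c g hc]
      exact ih acc _ _ (fun x => by
        simp only [PySem.Dict.modify, PySem.Dict.getD_insert]
        by_cases hx : x = c <;> simp [hx, hd x, hd c])
    · rw [if_neg (by rw [hd c]; exact hc), pvFilt_cons_neg cnt c g hc]
      obtain ⟨b1, b2⟩ := ih (acc ++ [c]) d cnt hd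
      exact ⟨by simpa using b1, b2⟩

theorem pvBmain (t : List (List Int)) (out : List (List Int)) (d : PySem.Dict Int Int) (cnt : Int → Int)
    (hd : ∀ x, d.getD x 0 = cnt x) :
    (t.foldl (fun (acc : List (List Int) × PySem.Dict Int Int) group =>
        let p := group.foldl
          (fun (p : List Int × PySem.Dict Int Int) c =>
            if p.2.getD c 0 > 0 then (p.1, p.2.modify c 0 (· - 1)) else (p.1 ++ [c], p.2))
          (([] : List Int), acc.2)
        (if p.1.isEmpty then acc.1 else acc.1 ++ [p.1], p.2)) (out, d)).1
      = out ++ (pvProc cnt t).filter (fun g => !g.isEmpty) := by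
  induction t generalizing out d cnt with
  | nil => simp [pvProc]
  | cons g t ih =>
    simp only [List.foldl_cons]
    obtain ⟨b1, b2⟩ := pvBgroup g [] d cnt hd
    simp only [pvProc, List.filter_cons]
    rw [ih _ _ _ b2]
    rw [List.nil_append] at b1
    rw [b1]
    by_cases he : (pvFilt cnt g).1.isEmpty
    · simp [he]
    · simp only [he, Bool.not_false, if_true]
      simp [List.append_assoc]

-- phase 2 of A: collect the indices of empty groups and pop them from the right
def pvEmpIdx (t : List (List Int)) : List Nat :=
  (List.range t.length).filter (fun j => (t.getD j []).isEmpty)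

theorem pvFoldlIf {α β : Type} (l : List α) (p : α → Prop) [DecidablePred p] (f : α → β)
    (acc : List β) :
    l.foldl (fun acc x => if p x then acc ++ [f x] else acc) acc
      = acc ++ (l.filter (fun x => decide (p x))).map f := by
  induction l generalizing acc with
  | nil => simp
  | cons x l ih => by_cases hx : p x <;> simp [hx, ih]

theorem pvEmpIdx_cons (g : List Int) (t : List (List Int)) :
    pvEmpIdx (g :: t) = (if g.isEmpty then [0] else []) ++ (pvEmpIdx t).map Nat.succ := by
  simp only [pvEmpIdx, List.length_cons, List.range_succ_eq_map, List.filter_cons,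
    List.filter_map]
  by_cases hg : g.isEmpty <;>
    simp [hg, Function.comp_def]

theorem pvPopShift (s : List (List Int)) (g : List Int) (j : Nat) :
    pvPopStep (g :: s) ((j : Int) + 1) = g :: pvPopStep s (j : Int) := by
  by_cases hj : j < s.length
  · have h1 : ((j : Int) + 1) = (((j + 1 : Nat)) : Int) := by push_cast; ring
    rw [pvPopStep, pvPopStep, h1, PySem.List.pop?_natCast _ (j + 1) (by simpa using hj),
      PySem.List.pop?_natCast _ j hj]
    simp
  · have h0 : (0 : Int) ≤ (j : Int) + 1 := by positivity
    have h0' : (0 : Int) ≤ (j : Int) := Int.natCast_nonneg j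
    have h1 : ¬ ((j : Int) + 1 < ((g :: s).length : Int)) := by simp; omega
    have h2 : ¬ ((j : Int) < (s.length : Int)) := by exact_mod_cast hj
    simp [pvPopStep, PySem.List.pop?, PySem.List.pyIdx?, h0, h0', h2]

theorem pvPopShiftFold (js : List Nat) (s : List (List Int)) (g : List Int) :
    (List.map (fun (j : Nat) => ((j : Int) + 1)) js).foldl pvPopStep (g :: s)
      = g :: (List.map (fun (j : Nat) => (j : Int)) js).foldl pvPopStep s := by
  induction js generalizing s with
  | nil => rfl
  | cons j js ih =>
    simp only [List.map_cons, List.foldl_cons]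
    rw [pvPopShift, ih]

theorem pvPopAll (t : List (List Int)) :
    (List.map (fun (j : Nat) => (j : Int)) (pvEmpIdx t).reverse).foldl pvPopStep t
      = t.filter (fun g => !g.isEmpty) := by
  induction t with
  | nil => rfl
  | cons g t ih =>
    rw [pvEmpIdx_cons, List.reverse_append, List.map_append, List.foldl_append]
    have hm : List.map (fun (j : Nat) => (j : Int)) ((pvEmpIdx t).map Nat.succ).reverse
        = List.map (fun (j : Nat) => ((j : Int) + 1)) (pvEmpIdx t).reverse := by
      rw [← List.map_reverse, List.map_map]
      exact List.map_congr_left (fun j _ => by simp [Function.comp])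
    rw [hm, pvPopShiftFold, ih]
    by_cases hg : g.isEmpty
    · have hgnil : g = [] := List.isEmpty_iff.mp hg
      simp [hgnil, pvPopStep, PySem.List.pop?_zero_cons]
    · simp [hg]

theorem pvDelteList (t : List (List Int)) :
    (PySem.List.pyRange 0 (PySem.List.len t) 1).foldl
        (fun acc j => if PySem.List.len (PySem.List.pyGetD t j []) = 0 then acc ++ [j] else acc)
        ([] : List Int)
      = List.map (fun (j : Nat) => (j : Int)) (pvEmpIdx t) := by
  rw [show PySem.List.len t = ((t.length : Nat) : Int) from by simp,
    PySem.List.pyRange_zero_nat, List.foldl_map, pvFoldlIf (List.range t.length)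
      (fun j => PySem.List.len (PySem.List.pyGetD t (j : Int) []) = 0) (fun j => (j : Int)) []]
  rw [List.nil_append, pvEmpIdx]
  congr 1
  refine List.filter_congr (fun j _ => ?_)
  rw [PySem.List.pyGetD_natCast]
  cases t.getD j []
  · simp
  · simp
    omega

theorem pvSortedRev (t : List (List Int)) :
    PySem.List.sorted (List.map (fun (j : Nat) => (j : Int)) (pvEmpIdx t)) (fun x => x) true
      = List.map (fun (j : Nat) => (j : Int)) (pvEmpIdx t).reverse := by
  apply PySem.List.sorted_rev_eq_of_perm_of_pairwise_gt
  · exact (List.reverse_perm (pvEmpIdx t)).map _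
  · rw [List.pairwise_map, List.pairwise_reverse]
    exact (List.pairwise_lt_range.filter _).imp (fun h => by exact_mod_cast h)

-- ===== VERDICT (by name: the statement is the Claim_ definition above) =====
theorem delte_old_course_in_better_pi_spec : Claim_equal_delte_old_course_in_better_pi := by
  intro tb better_pi _
  show delte_old_course_in_better_pi tb better_pi = delte_old_course_in_better_pi_alt tb better_pi
  simp only [delte_old_course_in_better_pi, delte_old_course_in_better_pi_alt]
  have hcnt : ∀ x, ((PySem.Dict.ofList better_pi).values.foldl
      (fun d pi => pi.foldl (fun (d : PySem.Dict Int Int) c => d.modify c 0 (· + 1)) d)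
      PySem.Dict.empty).getD x 0
      = (fun c => ((((PySem.Dict.ofList better_pi).values.flatMap id).count c : Nat) : Int)) x := by
    intro x
    rw [pvCntBuild]
    simp [PySem.Dict.getD, PySem.Dict.empty, PySem.Dict.get?]
  rw [pvFoldlNested, pvFoldlRemove, pvDelteList, pvSortedRev, pvPopAll,
    pvBmain tb [] _ _ hcnt, List.nil_append]
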